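-- pv_equiv track=rewrite | github.com/ryosism/tcn_tripletloss | src/predict_many.py | thinouted
-- ===== SOURCE A (Python) =====
-- def thinouted(lst, newsize):
--     """間引いたリストを返す"""
--     result = []
--     cnt = 0
--     for x in lst:
--         cnt -= newsize
--         if cnt < 0:
--             cnt += len(lst)
--             result.append(x)
--     return result
-- ===== SOURCE B (Python) =====
-- def thinouted(lst, newsize):
--     """間引いたリストを返す"""
--     n = len(lst)
--     if newsize <= 0:
--         return []
--     if newsize >= n:
--         return list(lst)
--     return [lst[(j * n) // newsize] for j in range(newsize)]
-- ===== Notes on version B (the rewrite author's own statement) =====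
-- stated objective: alternative
-- what changed: Replaces A's per-element accumulator loop over the whole list with a closed-form index formula lst[(j*len(lst))//newsize] computed only for each of the newsize outputs.
import Mathlib
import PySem

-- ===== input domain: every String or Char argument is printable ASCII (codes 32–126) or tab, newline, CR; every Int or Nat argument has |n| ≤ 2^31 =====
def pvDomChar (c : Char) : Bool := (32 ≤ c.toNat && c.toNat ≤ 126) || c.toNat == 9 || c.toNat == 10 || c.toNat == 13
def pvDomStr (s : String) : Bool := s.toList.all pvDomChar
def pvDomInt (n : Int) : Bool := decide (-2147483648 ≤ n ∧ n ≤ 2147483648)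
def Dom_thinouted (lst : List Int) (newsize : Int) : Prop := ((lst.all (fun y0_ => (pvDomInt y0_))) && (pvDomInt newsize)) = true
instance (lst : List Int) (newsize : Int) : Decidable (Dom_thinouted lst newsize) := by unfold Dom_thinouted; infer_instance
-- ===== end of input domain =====

-- B replaces A's per-element accumulator loop with a direct closed-form index
-- computation that iterates only over the newsize outputs.

-- ===== PORT A =====
-- literal port of A's loop: state (result, cnt), cnt -= newsize; if cnt < 0 then cnt += len(lst), append x
def thinouted (lst : List Int) (newsize : Int) : List Int :=
  (lst.foldl (fun (acc : List Int × Int) x =>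
      let cnt := acc.2 - newsize
      if cnt < 0 then (acc.1 ++ [x], cnt + (lst.length : Int)) else (acc.1, cnt))
    ([], 0)).1

-- ===== PORT B =====
-- lst[(j*n)//newsize]: index is always in range here, so `.getD 0` never supplies the default (exact)
def thinouted_alt (lst : List Int) (newsize : Int) : List Int :=
  let n : Int := lst.length
  if newsize ≤ 0 then []
  else if n ≤ newsize then lst
  else (List.range newsize.toNat).map
    (fun (j : Nat) => (PySem.List.pyGet? lst (PySem.Int.floordiv ((j : Int) * n) newsize)).getD 0)

-- ===== PRECONDITION & SPEC =====
def Spec_thinouted (lst : List Int) (newsize : Int) (out : List Int) : Prop := out = thinouted_alt lst newsize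
instance (lst : List Int) (newsize : Int) (out : List Int) : Decidable (Spec_thinouted lst newsize out) := by unfold Spec_thinouted; infer_instance

-- ===== CLAIM (what is proved, stated in full; the proofs are below) =====
def Claim_equal_thinouted : Prop := ∀ (lst : List Int) (newsize : Int), Dom_thinouted lst newsize → Spec_thinouted lst newsize (thinouted lst newsize)

-- ===== LEMMAS AND PROOFS =====

-- the loop body of A, with n = lst.length fixed
def pvStep (n ns : Int) (acc : List Int × Int) (x : Int) : List Int × Int :=
  let cnt := acc.2 - ns
  if cnt < 0 then (acc.1 ++ [x], cnt + n) else (acc.1, cnt)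

theorem pvStep_eq (lst : List Int) (ns : Int) :
    (fun (acc : List Int × Int) x =>
      let cnt := acc.2 - ns
      if cnt < 0 then (acc.1 ++ [x], cnt + (lst.length : Int)) else (acc.1, cnt))
    = pvStep (lst.length : Int) ns := rfl

-- newsize ≤ 0: cnt never goes negative, nothing is appended
theorem pvLoop_nonpos (n ns : Int) (hns : ns ≤ 0) :
    ∀ (t : List Int) (res : List Int) (c : Int), 0 ≤ c →
      t.foldl (pvStep n ns) (res, c) = (res, c - t.length * ns) := by
  intro t
  induction t with
  | nil => intro res c hc; simp
  | cons x t ih =>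
    intro res c hc
    have hnn : ¬ (c - ns < 0) := by omega
    simp only [List.foldl_cons, pvStep, hnn, if_false]
    rw [ih res (c - ns) (by omega)]
    simp only [List.length_cons, Prod.mk.injEq, true_and]
    push_cast
    ring

-- n ≤ newsize (and 0 < newsize): every element is appended
theorem pvLoop_all (n ns : Int) (hns : 0 < ns) (hn : n ≤ ns) :
    ∀ (t : List Int) (res : List Int) (c : Int), c ≤ 0 →
      (t.foldl (pvStep n ns) (res, c)).1 = res ++ t := by
  intro t
  induction t with
  | nil => intro res c _; simp
  | cons x t ih =>
    intro res c hc
    have hneg : c - ns < 0 := by omega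
    simp only [List.foldl_cons, pvStep, hneg, if_true]
    rw [ih (res ++ [x]) (c - ns + n) (by omega)]
    simp

-- the main invariant for 0 < newsize < n = lst.length:
-- after i steps the state is (first k outputs, c) with k*n = i*ns + c, 0 ≤ c < n
theorem pvLoop_main (lst : List Int) (ns : Int) (hns : 0 < ns)
    (hlt : ns < (lst.length : Int)) :
    ∀ (t : List Int) (i : Nat) (res : List Int) (c k : Int),
      lst.drop i = t → 0 ≤ c → c < (lst.length : Int) →
      k * (lst.length : Int) = (i : Int) * ns + c →
      (t.foldl (pvStep (lst.length : Int) ns) (res, c)).1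
        = res ++ (List.range (ns - k).toNat).map
            (fun (j : Nat) => (PySem.List.pyGet? lst
              (PySem.Int.floordiv ((k + (j : Int)) * (lst.length : Int)) ns)).getD 0) := by
  intro t
  set n : Int := (lst.length : Int) with hn
  induction t with
  | nil =>
    intro i res c k hdrop hc0 hcn hk
    have hi : lst.length ≤ i := by
      by_contra h
      have := List.drop_eq_getElem_cons (l := lst) (by omega : i < lst.length)
      rw [hdrop] at this
      simp at this
      omega
    have hi2 : (i : Int) ≥ n := by rw [hn]; exact_mod_cast hi
    have hkns : ns ≤ k := by nlinarith
    have : (ns - k).toNat = 0 := by omega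
    simp [this]
  | cons x t ih =>
    intro i res c k hdrop hc0 hcn hk
    have hi : i < lst.length := by
      by_contra h
      rw [List.drop_eq_nil_of_le (by omega)] at hdrop
      simp at hdrop
    have hx : lst.drop i = lst[i] :: lst.drop (i + 1) :=
      List.drop_eq_getElem_cons hi
    rw [hdrop] at hx
    obtain ⟨hxe, hte⟩ : x = lst[i] ∧ t = lst.drop (i + 1) := by
      exact ⟨by injection hx, by injection hx⟩
    have hin : (i : Int) < n := by rw [hn]; exact_mod_cast hi
    by_cases hcns : c - ns < 0
    · -- append step
      simp only [List.foldl_cons, pvStep, hcns, if_true]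
      rw [ih (i + 1) (res ++ [x]) (c - ns + n) (k + 1) hte.symm (by omega) (by omega)
        (by push_cast; nlinarith)]
      have hkpos : k < ns := by nlinarith
      have hsz : (ns - k).toNat = (ns - (k + 1)).toNat + 1 := by omega
      rw [hsz, List.range_succ_eq_map]
      have hdiv : PySem.Int.floordiv (k * n) ns = (i : Int) := by
        rw [PySem.Int.floordiv_eq_iff_of_pos hns]
        constructor <;> nlinarith
      have hget : (PySem.List.pyGet? lst (PySem.Int.floordiv (k * n) ns)).getD 0 = x := by
        rw [hdiv, hxe]
        have : PySem.List.pyGet? lst ((i : Nat) : Int) = lst[(i : Nat)]? := by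
          exact PySem.List.pyGet?_natCast lst i
        rw [this, List.getElem?_eq_getElem hi]
        rfl
      simp only [List.map_cons, List.map_map, List.append_assoc, Nat.cast_zero, add_zero,
        hget, List.singleton_append]
      congr 2
      apply List.map_congr_left
      intro j _
      simp only [Function.comp_apply]
      congr 3
      push_cast
      ring
    · -- skip step
      simp only [List.foldl_cons, pvStep, hcns, if_false]
      exact ih (i + 1) res (c - ns) k hte.symm (by omega) (by omega) (by push_cast; linarith)

-- ===== VERDICT (by name: the statement is the Claim_ definition above) =====
theorem thinouted_spec : Claim_equal_thinouted := by
  intro lst ns _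
  unfold Spec_thinouted thinouted thinouted_alt
  rw [pvStep_eq]
  by_cases h1 : ns ≤ 0
  · rw [pvLoop_nonpos (lst.length : Int) ns h1 lst [] 0 le_rfl]
    simp [h1]
  · by_cases h2 : (lst.length : Int) ≤ ns
    · rw [pvLoop_all (lst.length : Int) ns (by omega) h2 lst [] 0 le_rfl]
      simp [if_neg h1, if_pos h2]
    · rw [pvLoop_main lst ns (by omega) (by omega) lst 0 [] 0 0 (by simp) le_rfl (by omega)
        (by ring)]
      simp [if_neg h1, if_neg h2, zero_add, sub_zero]
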